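-- pv_equiv track=rewrite | github.com/benz0id/mb_prime | hetero_spacer_generator/primer_tools.py | get_cross_iteration_pattern
-- ===== SOURCE A (Python) =====
-- from typing import Any, Callable, Collection, Generic, Iterator, List, Tuple, \
--     Dict, Iterable, Union, TypeVar
--
-- def get_cross_iteration_pattern(num_iter: int) -> List[List[Tuple[int, int]]]:
--     """Returns an iteration pattern that, when performed over a square
--     matrix, ensures that each column and row is iterated over the once number
--     each iteration.
--     Usage:
--     >>> # Some square matrix, below example just shows symmetry of iteration.
--     >>> matrix = [[1, 2, 3],
--     ...           [4, 5, 6],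
--     ...           [7, 8, 9]]
--     >>> for iteration in get_cross_iteration_pattern(len(matrix))
--     ...     total = 0
--     ...     for indices in iteration:
--     ...         total += matrix[indices[0]][indices[1]]
--     ...     assert total == 15
--     """
--     iter_p = []
--     # Get first iteration, straight down the middle.
--     for i in range(num_iter):
--         iter_s = []
--         for j in range(num_iter):
--             k = j + i
--             if k >= num_iter:
--                 k -= num_iter
--             iter_s.append((j, k))
--         iter_p.append(iter_s)
--
--     return iter_p
-- ===== SOURCE B (Python) =====
-- def get_cross_iteration_pattern(num_iter):
--     d = list(range(num_iter))
--     pattern = []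
--     for _ in range(num_iter):
--         pattern.append(list(enumerate(d)))
--         d = d[1:] + d[:1]
--     return pattern
-- ===== Notes on version B (the rewrite author's own statement) =====
-- stated objective: alternative
-- what changed: Instead of computing (i+j) mod num_iter per cell with a conditional, B carries a running rotated index list across iterations (rotate-left by slicing each step) and emits each row as enumerate(d).
import Mathlib
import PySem

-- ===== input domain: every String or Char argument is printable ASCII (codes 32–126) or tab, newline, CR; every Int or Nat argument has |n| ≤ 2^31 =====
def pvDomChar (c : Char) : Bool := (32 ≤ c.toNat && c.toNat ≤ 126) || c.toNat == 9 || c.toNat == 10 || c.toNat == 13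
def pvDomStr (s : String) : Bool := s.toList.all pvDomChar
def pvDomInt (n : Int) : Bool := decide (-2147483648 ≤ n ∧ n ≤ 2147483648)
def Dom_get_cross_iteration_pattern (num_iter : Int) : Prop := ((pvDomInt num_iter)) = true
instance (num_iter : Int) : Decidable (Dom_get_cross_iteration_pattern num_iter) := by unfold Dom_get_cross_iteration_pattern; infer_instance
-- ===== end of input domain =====

-- B replaces the per-cell modular conditional by a running rotated index list; different decomposition, same cost.

-- ===== PORT A =====
def get_cross_iteration_pattern (num_iter : Int) : List (List (Int × Int)) :=
  (PySem.List.pyRange 0 num_iter 1).foldl (fun iter_p i =>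
    iter_p ++ [(PySem.List.pyRange 0 num_iter 1).foldl (fun iter_s j =>
      let k := j + i
      let k := if k ≥ num_iter then k - num_iter else k
      iter_s ++ [(j, k)]) []]) []

-- ===== PORT B =====
def get_cross_iteration_pattern_alt (num_iter : Int) : List (List (Int × Int)) :=
  ((PySem.List.pyRange 0 num_iter 1).foldl
    (fun st _ =>
      (PySem.List.slice st.1 (some 1) none ++ PySem.List.slice st.1 none (some 1),
       st.2 ++ [PySem.List.enumerate st.1 0]))
    (PySem.List.pyRange 0 num_iter 1, [])).2

-- ===== PRECONDITION & SPEC =====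
def Spec_get_cross_iteration_pattern (num_iter : Int) (out : List (List (Int × Int))) : Prop := out = get_cross_iteration_pattern_alt num_iter
instance (num_iter : Int) (out : List (List (Int × Int))) : Decidable (Spec_get_cross_iteration_pattern num_iter out) := by unfold Spec_get_cross_iteration_pattern; infer_instance

-- ===== CLAIM (what is proved, stated in full; the proofs are below) =====
def Claim_equal_get_cross_iteration_pattern : Prop := ∀ (num_iter : Int), Dom_get_cross_iteration_pattern num_iter → Spec_get_cross_iteration_pattern num_iter (get_cross_iteration_pattern num_iter)

-- ===== LEMMAS AND PROOFS =====

-- the rotation step of B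
def pvRot (d : List Int) : List Int :=
  PySem.List.slice d (some 1) none ++ PySem.List.slice d none (some 1)

lemma pvRot_eq (d : List Int) : pvRot d = d.tail ++ d.take 1 := by
  unfold pvRot
  rw [PySem.List.slice_from_one]
  simp [PySem.List.slice_to]

-- B's fold, unrolled: step t sees pvRot^[t] d
lemma fold_rot (l : List Int) (d : List Int) (acc : List (List (Int × Int))) :
    l.foldl (fun st _ =>
        (PySem.List.slice st.1 (some 1) none ++ PySem.List.slice st.1 none (some 1),
         st.2 ++ [PySem.List.enumerate st.1 0])) (d, acc)
    = (pvRot^[l.length] d,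
       acc ++ (List.range l.length).map (fun t => PySem.List.enumerate (pvRot^[t] d) 0)) := by
  induction l generalizing d acc with
  | nil => simp
  | cons x xs ih =>
    simp only [List.foldl_cons, List.length_cons, ih]
    have hs : PySem.List.slice d (some 1) none ++ PySem.List.slice d none (some 1) = pvRot d := rfl
    rw [hs, ← Function.iterate_succ_apply, List.range_succ_eq_map]
    simp [Function.iterate_succ_apply, List.map_map, Function.comp, List.append_assoc]

-- iterated rotation of range n
lemma rot_iter_range (m : Nat) (t : Nat) (ht : t ≤ m) :
    pvRot^[t] (PySem.List.pyRange 0 (m : Int) 1)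
    = PySem.List.pyRange (t : Int) (m : Int) 1 ++ PySem.List.pyRange 0 (t : Int) 1 := by
  induction t with
  | zero => simp [PySem.List.pyRange_one_eq_nil (by omega : (0:Int) ≤ 0)]
  | succ t ih =>
    have ht' : t ≤ m := by omega
    have htm : (t : Int) < (m : Int) := by exact_mod_cast ht
    rw [Function.iterate_succ_apply', ih ht', pvRot_eq,
        PySem.List.pyRange_one_cons htm]
    simp only [List.tail_cons, List.cons_append]
    have htake : List.take 1 ((t:Int) :: (PySem.List.pyRange ((t:Int)+1) (m:Int) 1 ++ PySem.List.pyRange 0 (t:Int) 1)) = [(t:Int)] := rfl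
    rw [htake, List.append_assoc,
        ← PySem.List.pyRange_one_succ_right (by omega : (0:Int) ≤ (t:Int))]
    push_cast
    simp

-- each B row equals the corresponding A row
lemma row_eq (m : Nat) (i : Nat) (hi : i < m) :
    PySem.List.enumerate (pvRot^[i] (PySem.List.pyRange 0 (m : Int) 1)) 0
    = (PySem.List.pyRange 0 (m : Int) 1).map
        (fun j => (j, if j + (i : Int) ≥ (m : Int) then j + i - m else j + i)) := by
  rw [rot_iter_range m i (by omega)]
  apply List.ext_getElem
  · simp [PySem.List.length_enumerate, PySem.List.length_pyRange_one]
    omega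
  · intro k h1 h2
    rw [PySem.List.getElem_enumerate]
    have hk : k < m := by
      simp [PySem.List.length_enumerate, PySem.List.length_pyRange_one] at h1; omega
    have hlen : (PySem.List.pyRange (i : Int) (m : Int) 1).length = m - i := by
      simp [PySem.List.length_pyRange_one]
    simp only [List.getElem_map, PySem.List.getElem_pyRange_one]
    by_cases hc : k < m - i
    · rw [List.getElem_append_left (by omega)]
      rw [PySem.List.getElem_pyRange_one]
      rw [if_neg (show ¬ ((0:Int) + k + i ≥ (m:Int)) by omega)]
      simp only [Prod.mk.injEq, true_and]
      omega
    · rw [List.getElem_append_right (by omega)]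
      rw [PySem.List.getElem_pyRange_one]
      rw [if_pos (show ((0:Int) + k + i ≥ (m:Int)) by omega)]
      rw [hlen]
      simp only [Prod.mk.injEq, true_and]
      omega

-- ===== VERDICT (by name: the statement is the Claim_ definition above) =====
theorem get_cross_iteration_pattern_spec : Claim_equal_get_cross_iteration_pattern := by
  intro n _
  unfold Spec_get_cross_iteration_pattern get_cross_iteration_pattern get_cross_iteration_pattern_alt
  by_cases hn : n ≤ 0
  · rw [PySem.List.pyRange_one_eq_nil (by omega)]
    simp
  · obtain ⟨m, hm⟩ : ∃ m : Nat, n = (m : Int) := ⟨n.toNat, by omega⟩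
    subst hm
    rw [fold_rot]
    simp only [List.nil_append, PySem.List.length_pyRange_one]
    rw [PySem.List.foldl_append_singleton_eq_map
      (f := fun i => (PySem.List.pyRange 0 (m:Int) 1).foldl (fun iter_s j =>
        iter_s ++ [(j, if j + i ≥ (m:Int) then j + i - m else j + i)]) [])]
    simp only [List.nil_append]
    have hm0 : ((m:Int) - 0).toNat = m := by omega
    rw [hm0]
    apply List.ext_getElem
    · simp [PySem.List.length_pyRange_one]
    · intro k h1 h2
      have hk : k < m := by simpa using h2
      simp only [List.getElem_map, List.getElem_range, PySem.List.getElem_pyRange_one]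
      rw [row_eq m k hk,
          PySem.List.foldl_append_singleton_eq_map
            (f := fun j => (j, if j + (0 + (k:Int)) ≥ (m:Int) then j + (0 + (k:Int)) - m else j + (0 + (k:Int))))]
      simp
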